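-- pv_equiv track=rewrite | github.com/Delfictus/PRISM-AI-DoD | scripts/api_ultimate.py | find_disulfide_bonds
-- ===== SOURCE A (Python) =====
-- from typing import Optional, Dict, List, Any, Tuple
--
-- def find_disulfide_bonds(sequence: str) -> List[Tuple[int, int]]:
--     """Find potential disulfide bonds between cysteines"""
--     cysteines = [i + 1 for i, aa in enumerate(sequence) if aa == 'C']
--     bonds = []
--
--     for i in range(len(cysteines)):
--         for j in range(i + 1, len(cysteines)):
--             if abs(cysteines[i] - cysteines[j]) > 3:  # Not adjacent
--                 bonds.append((cysteines[i], cysteines[j]))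
--
--     return bonds
-- ===== SOURCE B (Python) =====
-- def _far_start(c, ps, k):
--     # ps is ascending; return first index j >= k with ps[j] > c + 3
--     while k < len(ps) and ps[k] <= c + 3:
--         k += 1
--     return k
--
-- def find_disulfide_bonds(sequence):
--     """Find potential disulfide bonds between cysteines"""
--     positions = [i + 1 for i, aa in enumerate(sequence) if aa == 'C']
--     bonds = []
--     for k, c in enumerate(positions):
--         j = _far_start(c, positions, k + 1)
--         for d in positions[j:]:
--             bonds.append((c, d))
--     return bonds
-- ===== Notes on version B (the rewrite author's own statement) =====
-- stated objective: alternative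
-- what changed: Instead of testing abs(c_i-c_j)>3 for every later pair, B uses the fact that the position list is strictly increasing: for each cysteine it advances a pointer past the near positions (<= c+3) and pairs c with the entire remaining suffix, replacing per-pair filtering by a boundary scan plus suffix append.
import Mathlib
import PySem

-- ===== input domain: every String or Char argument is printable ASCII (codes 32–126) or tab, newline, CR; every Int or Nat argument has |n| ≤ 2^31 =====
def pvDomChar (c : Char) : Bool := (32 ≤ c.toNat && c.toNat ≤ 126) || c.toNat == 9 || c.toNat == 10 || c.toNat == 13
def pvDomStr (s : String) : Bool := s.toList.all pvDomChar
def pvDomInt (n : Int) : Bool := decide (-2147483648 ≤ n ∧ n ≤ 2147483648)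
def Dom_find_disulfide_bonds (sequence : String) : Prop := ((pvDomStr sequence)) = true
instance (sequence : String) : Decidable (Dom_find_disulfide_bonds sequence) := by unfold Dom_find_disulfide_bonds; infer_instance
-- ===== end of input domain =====

-- B replaces A's per-pair abs-filter by a boundary scan over the strictly increasing
-- cysteine position list followed by a suffix append (alternative decomposition, same results).


-- ===== PORT A =====
def find_disulfide_bonds (sequence : String) : List (Int × Int) :=
  let cys : List Int := (PySem.List.enumerate sequence.toList 0).foldl
    (fun acc p => if p.2 == 'C' then acc ++ [p.1 + 1] else acc) []
  (List.range cys.length).foldl (fun bonds i =>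
    (List.range' (i + 1) (cys.length - (i + 1))).foldl (fun bonds j =>
      if 3 < (cys.getD i 0 - cys.getD j 0).natAbs then
        bonds ++ [(cys.getD i 0, cys.getD j 0)]
      else bonds) bonds) []

-- ===== PORT B =====
-- _far_start + positions[j:]  (advance past positions ≤ c+3, return the suffix)
def dropNear (c : Int) : List Int → List Int
  | [] => []
  | p :: ps => if p ≤ c + 3 then dropNear c ps else p :: ps

-- outer loop of B: for each position c, pair c with the far suffix of the rest
def pairsFrom : List Int → List (Int × Int)
  | [] => []
  | c :: rest => (dropNear c rest).map (fun d => (c, d)) ++ pairsFrom rest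

def find_disulfide_bonds_alt (sequence : String) : List (Int × Int) :=
  pairsFrom ((PySem.List.enumerate sequence.toList 0).filterMap
    (fun p => if p.2 == 'C' then some (p.1 + 1) else none))

-- ===== PRECONDITION & SPEC =====
def Spec_find_disulfide_bonds (sequence : String) (out : List (Int × Int)) : Prop := out = find_disulfide_bonds_alt sequence
instance (sequence : String) (out : List (Int × Int)) : Decidable (Spec_find_disulfide_bonds sequence out) := by unfold Spec_find_disulfide_bonds; infer_instance

-- ===== CLAIM (what is proved, stated in full; the proofs are below) =====
def Claim_equal_find_disulfide_bonds : Prop := ∀ (sequence : String), Dom_find_disulfide_bonds sequence → Spec_find_disulfide_bonds sequence (find_disulfide_bonds sequence)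

-- ===== LEMMAS AND PROOFS =====

-- structural reading of A's nested index loops
def goA : List Int → List (Int × Int)
  | [] => []
  | c :: rest =>
      (rest.filter (fun d => decide (3 < (c - d).natAbs))).map (fun d => (c, d)) ++ goA rest

-- generic: a foldl over range' s (len-s) whose body reads l.getD j and l.drop (j+1)
-- is the structural recursion over l.drop s
def goPairs {β : Type} (g : β → Int → List Int → β) : β → List Int → β
  | b, [] => b
  | b, c :: rest => goPairs g (g b c rest) rest

theorem foldl_range'_drop {β : Type} (l : List Int) (g : β → Int → List Int → β) :
    ∀ (n s : Nat), n = l.length - s → ∀ b : β,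
      (List.range' s n).foldl (fun acc j => g acc (l.getD j 0) (l.drop (j + 1))) b
        = goPairs g b (l.drop s)
  | 0, s, h, b => by
      have : l.drop s = [] := List.drop_eq_nil_of_le (by omega)
      simp [this, goPairs]
  | n + 1, s, h, b => by
      have hs : s < l.length := by omega
      have hd : l.drop s = l[s] :: l.drop (s + 1) := List.drop_eq_getElem_cons hs
      rw [List.range'_succ, List.foldl_cons, hd]
      simp only [goPairs]
      rw [foldl_range'_drop l g n (s + 1) (by omega)]
      congr 2
      simp [List.getD_eq_getElem?_getD, List.getElem?_eq_getElem hs]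

theorem goPairs_ignore {β : Type} (h : β → Int → β) (b : β) (l : List Int) :
    goPairs (fun acc v _ => h acc v) b l = l.foldl h b := by
  induction l generalizing b with
  | nil => rfl
  | cons c rest ih => simp only [goPairs, List.foldl_cons, ih]

theorem foldl_if_append_pair (c : Int) (l : List Int) (b : List (Int × Int)) :
    l.foldl (fun acc d => if 3 < (c - d).natAbs then acc ++ [(c, d)] else acc) b
      = b ++ (l.filter (fun d => decide (3 < (c - d).natAbs))).map (fun d => (c, d)) := by
  induction l generalizing b with
  | nil => simp
  | cons p ps ih =>
      by_cases h : 3 < (c - p).natAbs <;> simp [h, ih]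

theorem goPairs_eq_goA (l : List Int) (b : List (Int × Int)) :
    goPairs (fun bonds c rest =>
        rest.foldl (fun acc d => if 3 < (c - d).natAbs then acc ++ [(c, d)] else acc) bonds)
      b l = b ++ goA l := by
  induction l generalizing b with
  | nil => simp [goPairs, goA]
  | cons c rest ih =>
      simp only [goPairs, goA]
      rw [ih, foldl_if_append_pair, List.append_assoc]

theorem filter_eq_dropNear (c : Int) (l : List Int)
    (hlt : ∀ d ∈ l, c < d) (hp : l.Pairwise (· < ·)) :
    l.filter (fun d => decide (3 < (c - d).natAbs)) = dropNear c l := by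
  induction l with
  | nil => rfl
  | cons p ps ih =>
      have hcp : c < p := hlt p (by simp)
      rcases List.pairwise_cons.mp hp with ⟨hpps, hps⟩
      by_cases h : p ≤ c + 3
      · have hdec : decide (3 < (c - p).natAbs) = false := by
          simp only [decide_eq_false_iff_not]; omega
        simp only [dropNear, if_pos h, List.filter_cons, hdec, Bool.false_eq_true]
        exact ih (fun d hd => lt_trans hcp (hpps d hd)) hps
      · have hdec : decide (3 < (c - p).natAbs) = true := by
          simp only [decide_eq_true_eq]; omega
        simp only [dropNear, if_neg h, List.filter_cons, hdec, if_pos]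
        congr 1
        exact List.filter_eq_self.mpr (fun d hd => by
          have := hpps d hd; simp only [decide_eq_true_eq]; omega)

theorem goA_eq_pairsFrom (l : List Int) (hp : l.Pairwise (· < ·)) :
    goA l = pairsFrom l := by
  induction l with
  | nil => rfl
  | cons c rest ih =>
      rcases List.pairwise_cons.mp hp with ⟨hcr, hrest⟩
      simp only [goA, pairsFrom, filter_eq_dropNear c rest hcr hrest, ih hrest]

theorem filterMap_if_eq_filter_map (l : List (Int × Char)) :
    l.filterMap (fun p => if p.2 == 'C' then some (p.1 + 1) else none)
      = (l.filter (fun p => p.2 == 'C')).map (fun p => p.1 + 1) := by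
  induction l with
  | nil => rfl
  | cons p ps ih =>
      by_cases hc : p.2 = 'C'
      · simpa [List.filterMap_cons, List.filter_cons, hc] using ih
      · simpa [List.filterMap_cons, List.filter_cons, hc] using ih

theorem cys_pairwise (s : List Char) :
    (((PySem.List.enumerate s 0).filter (fun p => p.2 == 'C')).map
        (fun p : Int × Char => p.1 + 1)).Pairwise (· < ·) := by
  have h1 : (PySem.List.enumerate s 0).Pairwise (fun p q : Int × Char => p.1 < q.1) :=
    PySem.List.pairwise_lt_enumerate _ _
  exact (h1.filter (fun p => p.2 == 'C')).map _ (fun a b h => by omega)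

-- ===== VERDICT (by name: the statement is the Claim_ definition above) =====
theorem find_disulfide_bonds_spec : Claim_equal_find_disulfide_bonds := by
  intro sequence _
  unfold Spec_find_disulfide_bonds find_disulfide_bonds find_disulfide_bonds_alt
  rw [PySem.List.foldl_append_if, filterMap_if_eq_filter_map]
  set cys := ((PySem.List.enumerate sequence.toList 0).filter (fun p => p.2 == 'C')).map
      (fun p : Int × Char => p.1 + 1) with hcys
  simp only [List.nil_append]
  rw [List.range_eq_range']
  have h1 : (List.range' 0 cys.length).foldl (fun bonds i =>
      (List.range' (i + 1) (cys.length - (i + 1))).foldl (fun bonds j =>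
        if 3 < (cys.getD i 0 - cys.getD j 0).natAbs then
          bonds ++ [(cys.getD i 0, cys.getD j 0)]
        else bonds) bonds) []
      = goPairs (fun bonds c rest =>
          rest.foldl (fun acc d => if 3 < (c - d).natAbs then acc ++ [(c, d)] else acc) bonds)
        [] (cys.drop 0) := by
    rw [← foldl_range'_drop cys _ cys.length 0 (by omega)]
    apply PySem.List.foldl_congr_mem
    intro bonds i hi
    exact (foldl_range'_drop cys
      (fun acc v _ => if 3 < (cys.getD i 0 - v).natAbs then acc ++ [(cys.getD i 0, v)] else acc)
      (cys.length - (i + 1)) (i + 1) rfl bonds).trans (goPairs_ignore _ _ _)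
  rw [h1]
  simp only [List.drop_zero]
  rw [goPairs_eq_goA, List.nil_append, goA_eq_pairsFrom cys (hcys ▸ cys_pairwise sequence.toList)]
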